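-- pv_equiv track=rewrite | github.com/baiwan-chenhao/rewrite | leetcode_gen_week4.py | solve
-- ===== SOURCE A (Python) =====
-- from functools import cache
--
-- def solve(s: str, k: int) -> int:
--     MOD = 1_000_000_007
--     n = len(s)
--
--     @cache
--     def dfs(i: int, left1: int, is_limit: bool) -> int:
--         if i == n:
--             return 0 if is_limit or left1 else 1
--         up = int(s[i]) if is_limit else 1
--         res = 0
--         for d in range(min(up, left1) + 1):
--             res += dfs(i + 1, left1 - d, is_limit and d == up)
--         return res % MOD
--
--     ans = 0
--     f = [0] * n
--     for i in range(1, n):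
--         f[i] = f[i.bit_count()] + 1
--         if f[i] <= k:
--             # 计算有多少个二进制数恰好有 i 个 1
--             ans += dfs(0, i, True)
--     dfs.cache_clear()  # 防止爆内存
--     return ans % MOD
-- ===== SOURCE B (Python) =====
-- from functools import cache
--
-- def solve(s: str, k: int) -> int:
--     MOD = 1_000_000_007
--     n = len(s)
--
--     @cache
--     def binom(m: int, r: int) -> int:  # C(m, r) mod MOD, 0 outside 0 <= r <= m
--         if r < 0 or r > m:
--             return 0
--         if r == 0 or r == m:
--             return 1
--         return (binom(m - 1, r - 1) + binom(m - 1, r)) % MOD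
--
--     def count(i: int) -> int:  # how many x < int(s, 2) have exactly i ones (mod MOD)
--         rem = n
--         ones = 0
--         res = 0
--         for ch in s:
--             rem -= 1
--             if ch == '1':
--                 res += binom(rem, i - ones)
--                 ones += 1
--         return res % MOD
--
--     ans = 0
--     f = [0] * n
--     for i in range(1, n):
--         f[i] = f[i.bit_count()] + 1
--         if f[i] <= k:
--             ans += count(i)
--     return ans % MOD
-- ===== Notes on version B (the rewrite author's own statement) =====
-- stated objective: simpler
-- what changed: Replaces the memoized digit-DP dfs(i,left1,is_limit) with a cached Pascal-rule binomial table plus a single left-to-right scan of s that, at each '1' bit, adds C(remaining bits, ones still needed) mod 1e9+7; the outer popcount/f[i]<=k loop is unchanged.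
-- outside the precondition, e.g. on solve('22', 1): A returns 2, B returns 0
import Mathlib
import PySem

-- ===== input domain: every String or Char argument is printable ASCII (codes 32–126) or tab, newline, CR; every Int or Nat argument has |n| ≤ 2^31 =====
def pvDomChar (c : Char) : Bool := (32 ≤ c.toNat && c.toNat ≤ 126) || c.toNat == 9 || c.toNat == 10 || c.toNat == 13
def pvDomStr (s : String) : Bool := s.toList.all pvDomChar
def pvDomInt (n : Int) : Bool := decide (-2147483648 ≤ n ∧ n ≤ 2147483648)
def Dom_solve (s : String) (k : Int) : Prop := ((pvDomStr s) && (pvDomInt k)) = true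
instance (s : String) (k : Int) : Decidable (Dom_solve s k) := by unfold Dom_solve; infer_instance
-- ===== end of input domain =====

-- B replaces A's memoized digit-DP with a Pascal-rule binomial helper plus one combinatorial
-- scan of s per qualifying popcount (same outer loop); objective: simpler.

-- ===== PORT A =====

-- int(s[i]) on a single char; Python raises ValueError on a non-digit char — those inputs are outside Pre_solve
def pyIntChar (c : Char) : Int := (PySem.Int.ofChars? [c]).getD 0

-- the cached dfs(i, left1, is_limit): recursion over the suffix of s starting at i
def dfsA : List Char → Int → Bool → Int
  | [], left1, lim => if lim || !(left1 == 0) then 0 else 1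
  | c :: t, left1, lim =>
    let up : Int := if lim then pyIntChar c else 1
    ((PySem.List.pyRange 0 (min up left1 + 1) 1).foldl
        (fun res d => res + dfsA t (left1 - d) (lim && (d == up))) 0) % 1000000007

-- body of 'for i in range(1, n)': f[i] = f[i.bit_count()] + 1; if f[i] <= k: ans += dfs(0, i, True)
def stepOutA (cs : List Char) (k : Int) (st : List Int × Int) (i : Int) : List Int × Int :=
  let fi := PySem.List.pyGetD st.1 ((PySem.Int.bitCount i : Nat) : Int) 0 + 1
  let f := PySem.List.pySetD st.1 i fi
  if PySem.List.pyGetD f i 0 ≤ k then (f, st.2 + dfsA cs i true) else (f, st.2)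

def solve (s : String) (k : Int) : Int :=
  let n : Int := PySem.Str.len s
  (((PySem.List.pyRange 1 n 1).foldl (stepOutA s.toList k)
      (PySem.List.pyRepeat [(0 : Int)] n, 0)).2) % 1000000007

-- ===== PORT B =====

-- binom(m, r): C(m, r) mod 1e9+7 by the Pascal rule, 0 outside 0 ≤ r ≤ m (cached in Source B)
def binomB (m r : Int) : Int :=
  if r < 0 ∨ m < r then 0
  else if r = 0 ∨ r = m then 1
  else (binomB (m - 1) (r - 1) + binomB (m - 1) r) % 1000000007
  termination_by m.toNat
  decreasing_by all_goals omega

-- loop body of count(i): rem -= 1; if ch == '1': res += binom(rem, i - ones); ones += 1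
def stepB (i : Int) (st : Int × Int × Int) (ch : Char) : Int × Int × Int :=
  let rem := st.1 - 1
  if ch == '1' then (rem, st.2.1 + 1, st.2.2 + binomB rem (i - st.2.1)) else (rem, st.2.1, st.2.2)

-- count(i): how many x < int(s, 2) have exactly i ones, mod 1e9+7
def countB (cs : List Char) (n i : Int) : Int :=
  (cs.foldl (stepB i) (n, 0, 0)).2.2 % 1000000007

-- outer-loop body of B: identical to A's except ans += count(i)
def stepOutB (cs : List Char) (n k : Int) (st : List Int × Int) (i : Int) : List Int × Int :=
  let fi := PySem.List.pyGetD st.1 ((PySem.Int.bitCount i : Nat) : Int) 0 + 1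
  let f := PySem.List.pySetD st.1 i fi
  if PySem.List.pyGetD f i 0 ≤ k then (f, st.2 + countB cs n i) else (f, st.2)

def solve_alt (s : String) (k : Int) : Int :=
  let n : Int := PySem.Str.len s
  (((PySem.List.pyRange 1 n 1).foldl (stepOutB s.toList n k)
      (PySem.List.pyRepeat [(0 : Int)] n, 0)).2) % 1000000007

-- ===== PRECONDITION & SPEC =====
-- Pre_ restricts to the task's natural domain, binary strings: on any other string A raises
-- ValueError (int(s[i]) on a non-digit) as soon as dfs is invoked, and on non-binary digit
-- strings such as "22" A's digit-DP value is meaningless for counting below a *binary* s;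
-- the k ≤ 0 and length ≤ 1 disjuncts keep the inputs on which dfs is never invoked and A
-- trivially returns 0.
def Pre_solve (s : String) (k : Int) : Prop :=
  (s.toList.all (fun c => c == '0' || c == '1')) = true ∨ k ≤ 0 ∨ s.toList.length ≤ 1
instance (s : String) (k : Int) : Decidable (Pre_solve s k) := by unfold Pre_solve; infer_instance

def pvWitness_solve : String × Int := ("101", 2)

def Spec_solve (s : String) (k : Int) (out : Int) : Prop := out = solve_alt s k
instance (s : String) (k : Int) (out : Int) : Decidable (Spec_solve s k out) := by unfold Spec_solve; infer_instance

-- ===== CLAIM (what is proved, stated in full; the proofs are below) =====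
def Claim_equal_solve : Prop := ∀ (s : String) (k : Int), Dom_solve s k → Pre_solve s k → Spec_solve s k (solve s k)

-- ===== LEMMAS AND PROOFS =====

lemma pyIntChar_zero : pyIntChar '0' = 0 := by decide
lemma pyIntChar_one : pyIntChar '1' = 1 := by decide

lemma addmod (a b : Int) : (a + b % 1000000007) % 1000000007 = (a + b) % 1000000007 := by
  omega

lemma binomB_out {m r : Int} (h : r < 0 ∨ m < r) : binomB m r = 0 := by
  rw [binomB, if_pos h]

lemma binomB_base {m r : Int} (h1 : ¬(r < 0 ∨ m < r)) (h2 : r = 0 ∨ r = m) : binomB m r = 1 := by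
  rw [binomB, if_neg h1, if_pos h2]

lemma binomB_rec {m r : Int} (h1 : ¬(r < 0 ∨ m < r)) (h2 : ¬(r = 0 ∨ r = m)) :
    binomB m r = (binomB (m - 1) (r - 1) + binomB (m - 1) r) % 1000000007 := by
  rw [binomB, if_neg h1, if_neg h2]

-- unfolding equations for dfsA on a cons cell, with the Bool scrutinees reduced
lemma dfsA_cons_free (c : Char) (t : List Char) (j : Int) :
    dfsA (c :: t) j false = ((PySem.List.pyRange 0 (min 1 j + 1) 1).foldl
      (fun res d => res + dfsA t (j - d) false) 0) % 1000000007 := by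
  simp [dfsA]

lemma dfsA_cons0 (t : List Char) (j : Int) :
    dfsA ('0' :: t) j true = ((PySem.List.pyRange 0 (min 0 j + 1) 1).foldl
      (fun res d => res + dfsA t (j - d) (d == (0:Int))) 0) % 1000000007 := by
  simp [dfsA, pyIntChar_zero]

lemma dfsA_cons1 (t : List Char) (j : Int) :
    dfsA ('1' :: t) j true = ((PySem.List.pyRange 0 (min 1 j + 1) 1).foldl
      (fun res d => res + dfsA t (j - d) (d == (1:Int))) 0) % 1000000007 := by
  simp [dfsA, pyIntChar_one]

-- dfs returns a value in [0, MOD)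
lemma dfsA_bounds (l : List Char) (j : Int) (b : Bool) :
    0 ≤ dfsA l j b ∧ dfsA l j b < 1000000007 := by
  cases l with
  | nil => simp only [dfsA]; split <;> omega
  | cons c t =>
    simp only [dfsA]
    exact ⟨Int.emod_nonneg _ (by norm_num), Int.emod_lt_of_pos _ (by norm_num)⟩

lemma dfsA_mod (l : List Char) (j : Int) (b : Bool) :
    dfsA l j b % 1000000007 = dfsA l j b :=
  Int.emod_eq_of_lt (dfsA_bounds l j b).1 (dfsA_bounds l j b).2

-- a negative ones-budget yields 0 (on binary strings)
lemma dfsA_neg (l : List Char) (hbin : ∀ c ∈ l, c = '0' ∨ c = '1') (j : Int) (hj : j < 0)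
    (b : Bool) : dfsA l j b = 0 := by
  cases l with
  | nil =>
    have hne : (j == 0) = false := by simp; omega
    simp [dfsA, hne]
  | cons c t =>
    have hup : (0 : Int) ≤ (if b then pyIntChar c else 1) := by
      rcases hbin c (by simp) with h | h <;> subst h <;>
        cases b <;> simp [pyIntChar_zero, pyIntChar_one]
    simp only [dfsA]
    rw [min_eq_right (by omega), PySem.List.pyRange_one_eq_nil (by omega)]
    rfl

-- the non-limit dfs value is the binomial coefficient
lemma dfsA_free (t : List Char) : ∀ j : Int, dfsA t j false = binomB (t.length : Int) j := by
  induction t with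
  | nil =>
    intro j
    by_cases hj : j = 0
    · subst hj; simp [dfsA, binomB_base (m := 0) (r := 0) (by omega) (by omega)]
    · have hne : (j == 0) = false := by simp [hj]
      simp [dfsA, hne, binomB_out (m := (0:Int)) (r := j) (by omega)]
  | cons c t ih =>
    intro j
    rw [dfsA_cons_free]
    have hc1 : (((c :: t).length : Nat) : Int) = (t.length : Int) + 1 := by
      push_cast [List.length_cons]; ring
    rw [hc1]
    rcases lt_trichotomy j 0 with hj | hj | hj
    · rw [min_eq_right (by omega), PySem.List.pyRange_one_eq_nil (by omega),
        binomB_out (Or.inl hj)]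
      rfl
    · subst hj
      rw [show min (1:Int) 0 = 0 by decide, show PySem.List.pyRange 0 (0+1) 1 = [(0:Int)] by decide]
      simp only [List.foldl_cons, List.foldl_nil, zero_add, sub_zero]
      rw [ih 0, binomB_base (by omega) (Or.inl rfl), binomB_base (by omega) (Or.inl rfl)]
      decide
    · rw [min_eq_left (by omega), show PySem.List.pyRange 0 (1+1) 1 = [(0:Int),1] by decide]
      simp only [List.foldl_cons, List.foldl_nil, zero_add, sub_zero]
      rw [ih j, ih (j - 1)]
      set m : Int := (t.length : Int) with hmdef
      have hm : (0 : Int) ≤ m := Int.natCast_nonneg _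
      rcases lt_trichotomy j (m + 1) with hj2 | hj2 | hj2
      · -- 1 ≤ j ≤ m
        rw [binomB_rec (m := m + 1) (r := j) (by omega) (by omega)]
        have e : (m + 1 - 1 : Int) = m := by ring
        rw [e, Int.add_comm]
      · subst hj2
        rw [binomB_out (m := m) (Or.inr (by omega)),
            binomB_base (m := m) (r := m + 1 - 1) (by omega) (Or.inr (by omega)),
            binomB_base (m := m + 1) (r := m + 1) (by omega) (Or.inr rfl)]
        decide
      · rw [binomB_out (m := m) (Or.inr (by omega)),
            binomB_out (m := m) (r := j - 1) (Or.inr (by omega)),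
            binomB_out (m := m + 1) (Or.inr hj2)]
        decide

-- B's fold is additive in the res component
lemma stepB_add (i : Int) (cs : List Char) :
    ∀ rem ones res : Int,
      (cs.foldl (stepB i) (rem, ones, res)).2.2
        = res + (cs.foldl (stepB i) (rem, ones, 0)).2.2 := by
  induction cs with
  | nil => intro rem ones res; simp
  | cons c t ih =>
    intro rem ones res
    cases hc : (c == '1') with
    | true =>
      simp only [List.foldl_cons, stepB, hc, if_true]
      rw [ih (rem - 1) (ones + 1) (res + binomB (rem - 1) (i - ones)),
        ih (rem - 1) (ones + 1) (0 + binomB (rem - 1) (i - ones))]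
      ring
    | false =>
      simp only [List.foldl_cons, stepB, hc]
      exact ih _ _ _

-- main lemma: the limited dfs equals B's scan
lemma dfsA_limit (l : List Char) (hbin : ∀ c ∈ l, c = '0' ∨ c = '1') :
    ∀ i ones : Int,
      dfsA l (i - ones) true =
        (l.foldl (stepB i) ((l.length : Int), ones, 0)).2.2 % 1000000007 := by
  induction l with
  | nil => intro i ones; simp [dfsA]
  | cons c t ih =>
    intro i ones
    have hbt : ∀ c ∈ t, c = '0' ∨ c = '1' := fun c hc => hbin c (by simp [hc])
    have ihp := ih hbt
    have hc1 : (((c :: t).length : Nat) : Int) = (t.length : Int) + 1 := by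
      push_cast [List.length_cons]; ring
    rcases hbin c (by simp) with hc | hc
    · -- c = '0'
      subst hc
      rw [dfsA_cons0, hc1, List.foldl_cons,
        show stepB i ((t.length : Int) + 1, ones, 0) '0' = ((t.length : Int), ones, 0) from by
          simp [stepB]]
      by_cases hneed : i - ones < 0
      · rw [min_eq_right (by omega), PySem.List.pyRange_one_eq_nil (by omega),
          ← ihp i ones, dfsA_neg t hbt _ hneed]
        rfl
      · rw [min_eq_left (by omega), show PySem.List.pyRange 0 (0+1) 1 = [(0:Int)] by decide]
        simp only [List.foldl_cons, List.foldl_nil, zero_add, sub_zero]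
        rw [show (((0:Int) == (0:Int)) : Bool) = true by decide, dfsA_mod, ihp i ones]
    · -- c = '1'
      subst hc
      rw [dfsA_cons1, hc1, List.foldl_cons,
        show stepB i ((t.length : Int) + 1, ones, 0) '1'
            = ((t.length : Int), ones + 1, 0 + binomB (t.length : Int) (i - ones)) from by
          simp [stepB], zero_add,
        stepB_add i t (t.length : Int) (ones + 1) (binomB (t.length : Int) (i - ones))]
      rcases lt_trichotomy (i - ones) 0 with hneed | hneed | hneed
      · rw [min_eq_right (by omega), PySem.List.pyRange_one_eq_nil (by omega),
          binomB_out (Or.inl hneed), zero_add, ← ihp i (ones + 1),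
          dfsA_neg t hbt _ (by omega)]
        rfl
      · rw [hneed, show min (1:Int) 0 = 0 by decide,
          show PySem.List.pyRange 0 (0+1) 1 = [(0:Int)] by decide]
        simp only [List.foldl_cons, List.foldl_nil, zero_add, sub_zero]
        rw [show (((0:Int) == (1:Int)) : Bool) = false by decide, dfsA_free t]
        conv_rhs => rw [← addmod]
        rw [← ihp i (ones + 1), dfsA_neg t hbt _ (by omega), add_zero]
      · rw [min_eq_left (by omega), show PySem.List.pyRange 0 (1+1) 1 = [(0:Int),1] by decide]
        simp only [List.foldl_cons, List.foldl_nil, zero_add, sub_zero]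
        rw [show (((0:Int) == (1:Int)) : Bool) = false by decide,
          show (((1:Int) == (1:Int)) : Bool) = true by decide, dfsA_free t,
          show i - ones - 1 = i - (ones + 1) from by ring, ihp i (ones + 1), addmod]

-- per-popcount counts agree on binary strings
lemma count_eq (cs : List Char) (hbin : ∀ c ∈ cs, c = '0' ∨ c = '1') (i : Int) :
    dfsA cs i true = countB cs (cs.length : Int) i := by
  have h := dfsA_limit cs hbin i 0
  simpa [countB] using h

-- folds of pointwise-agreeing, invariant-preserving steps are equal
lemma foldl_eq_of_inv {α σ : Type} (P : σ → Prop) (f g : σ → α → σ) :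
    ∀ (l : List α) (s : σ), (∀ s a, a ∈ l → P s → P (f s a)) →
      (∀ s a, a ∈ l → P s → f s a = g s a) → P s → l.foldl f s = l.foldl g s := by
  intro l
  induction l with
  | nil => intro s _ _ _; rfl
  | cons a t ih =>
    intro s hpres hag hs
    simp only [List.foldl_cons]
    rw [← hag s a (by simp) hs]
    exact ih _ (fun s' a' h => hpres s' a' (by simp [h]))
      (fun s' a' h => hag s' a' (by simp [h])) (hpres s a (by simp) hs)

lemma getD_nonneg (l : List Int) (hl : ∀ x ∈ l, 0 ≤ x) (n : Nat) : 0 ≤ l.getD n 0 := by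
  rcases h : l[n]? with _ | v
  · simp [List.getD, h]
  · simpa [List.getD, h] using hl v (List.mem_of_getElem? h)

-- ===== VERDICT (by name: the statement is the Claim_ definition above) =====
theorem solve_spec : Claim_equal_solve := by
  intro s k hdom hpre
  simp only [Spec_solve, solve, solve_alt]
  have hlen : PySem.Str.len s = (s.toList.length : Int) := PySem.Str.len_eq s
  suffices h : (PySem.List.pyRange 1 (PySem.Str.len s) 1).foldl (stepOutA s.toList k)
        (PySem.List.pyRepeat [(0 : Int)] (PySem.Str.len s), 0)
      = (PySem.List.pyRange 1 (PySem.Str.len s) 1).foldl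
        (stepOutB s.toList (PySem.Str.len s) k)
        (PySem.List.pyRepeat [(0 : Int)] (PySem.Str.len s), 0) by
    rw [h]
  rcases hpre with hbin0 | hk | hn
  · -- binary string: the two step functions agree everywhere
    have hbin : ∀ c ∈ s.toList, c = '0' ∨ c = '1' := by
      intro c hc
      have := List.all_eq_true.mp hbin0 c hc
      simpa using this
    exact foldl_eq_of_inv (fun _ => True) _ _ _ _ (fun _ _ _ _ => trivial)
      (fun st i _ _ => by
        simp only [stepOutA, stepOutB, hlen, count_eq s.toList hbin i])
      trivial
  · -- k ≤ 0: the guard f[i] ≤ k is never true, dfs/count are never invoked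
    apply foldl_eq_of_inv
      (fun st => st.1.length = s.toList.length ∧ ∀ x ∈ st.1, 0 ≤ x) _ _ _ _
    · -- preservation
      intro st i hi hP
      obtain ⟨hL, hE⟩ := hP
      simp only [stepOutA]
      have hfe : ∀ x ∈ PySem.List.pySetD st.1 i
          (PySem.List.pyGetD st.1 ((PySem.Int.bitCount i : Nat) : Int) 0 + 1), 0 ≤ x := by
        intro x hx
        have hmem := hi
        rcases PySem.List.mem_pyRange_one.mp hi with ⟨h1, h2⟩
        rw [PySem.List.pySetD_of_nonneg st.1 _ (show (0:Int) ≤ i by omega)] at hx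
        rcases List.mem_or_eq_of_mem_set hx with hx | hx
        · exact hE x hx
        · subst hx
          have := getD_nonneg st.1 hE (PySem.Int.bitCount i : Nat)
          simp only [PySem.List.pyGetD_natCast]
          omega
      split <;> exact ⟨by simp [PySem.List.length_pySetD, hL], hfe⟩
    · -- agreement: the guard is false on both sides
      intro st i hi hP
      obtain ⟨hL, hE⟩ := hP
      rcases PySem.List.mem_pyRange_one.mp hi with ⟨h1, h2⟩
      have hi0 : (0 : Int) ≤ i := by omega
      have hlt : i.toNat < st.1.length := by
        rw [hL]; rw [hlen] at h2; omega
      have hge : 0 ≤ PySem.List.pyGetD st.1 ((PySem.Int.bitCount i : Nat) : Int) 0 := by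
        have := getD_nonneg st.1 hE (PySem.Int.bitCount i : Nat)
        simpa [PySem.List.pyGetD_natCast] using this
      simp only [stepOutA, stepOutB]
      rw [PySem.List.pySetD_of_nonneg st.1 _ hi0]
      have hget : PySem.List.pyGetD
            (st.1.set i.toNat (PySem.List.pyGetD st.1 ((PySem.Int.bitCount i : Nat) : Int) 0 + 1)) i 0
          = PySem.List.pyGetD st.1 ((PySem.Int.bitCount i : Nat) : Int) 0 + 1 := by
        rw [PySem.List.pyGetD_eq_getElem _ 0 hi0 (by simp only [List.length_set]; omega)]
        exact List.getElem_set_self (by simpa using hlt)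
      rw [hget, if_neg (by omega), if_neg (by omega)]
    · -- init satisfies the invariant
      constructor
      · rw [PySem.List.pyRepeat_singleton, List.length_replicate, hlen]
        simp
      · intro x hx
        rw [PySem.List.pyRepeat_singleton] at hx
        simp_all [List.eq_of_mem_replicate hx]
  · -- length ≤ 1: the loop range(1, n) is empty
    rw [PySem.List.pyRange_one_eq_nil (by rw [hlen]; exact_mod_cast hn)]
    rfl
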